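-- pv_equiv track=rewrite | github.com/KongphopTongdee/Leetcode_Practices | MediumCode/49_GroupAnagrams.py | arrangeTheQuantity
-- ===== SOURCE A (Python) =====
-- def arrangeTheQuantity( itemToArrange ):
--     convertToDict = {}
--     for eachItem in itemToArrange:
--         convertToDict.update( { len(eachItem) : eachItem } )
--     sort_convertToDict = dict( sorted(convertToDict.items() ) )
--     convertToList = []
--     for key, value in sort_convertToDict.items():
--         convertToList.append( value )
--     return convertToList
-- ===== SOURCE B (Python) =====
-- def arrangeTheQuantity(itemToArrange):
--     items = sorted(itemToArrange, key=len)
--     result = []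
--     for s in reversed(items):
--         if not result or len(result[0]) != len(s):
--             result.insert(0, s)
--     return result
-- ===== Notes on version B (the rewrite author's own statement) =====
-- stated objective: alternative
-- what changed: Replaces the length-keyed dict plus items-sort with a stable sort of the input by length followed by one right-to-left scan that keeps the last item of each equal-length run (last-wins, ascending lengths), with no dict at all.
import Mathlib
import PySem

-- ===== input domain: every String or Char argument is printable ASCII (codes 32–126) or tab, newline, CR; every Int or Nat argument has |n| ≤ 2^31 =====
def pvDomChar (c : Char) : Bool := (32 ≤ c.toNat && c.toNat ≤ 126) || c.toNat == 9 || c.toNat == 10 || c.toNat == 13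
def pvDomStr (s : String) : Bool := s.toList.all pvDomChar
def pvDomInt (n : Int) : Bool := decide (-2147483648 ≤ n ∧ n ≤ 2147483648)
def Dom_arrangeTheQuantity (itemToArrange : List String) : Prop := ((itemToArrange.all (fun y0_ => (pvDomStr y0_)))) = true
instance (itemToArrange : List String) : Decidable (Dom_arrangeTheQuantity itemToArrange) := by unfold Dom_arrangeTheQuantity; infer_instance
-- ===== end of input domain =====

-- B replaces A's length-keyed dict + items-sort with a stable sort of the input by length and one
-- right-to-left scan keeping the last item of each equal-length run (alternative decomposition, not faster).

-- ===== PORT A =====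
def arrangeTheQuantity (itemToArrange : List String) : List String :=
  -- convertToDict = {}; for eachItem in itemToArrange: convertToDict.update({len(eachItem): eachItem})
  let convertToDict : PySem.Dict Int String :=
    itemToArrange.foldl (fun d eachItem => d.insert (PySem.Str.len eachItem) eachItem) PySem.Dict.empty
  -- sort_convertToDict = dict(sorted(convertToDict.items()))   (tuples compared lexicographically)
  let sort_convertToDict : PySem.Dict Int String :=
    PySem.Dict.ofList (PySem.List.sorted2 convertToDict.items (fun p => p.1) (fun p => p.2))
  -- for key, value in sort_convertToDict.items(): convertToList.append(value)
  sort_convertToDict.items.foldl (fun convertToList p => convertToList ++ [p.2]) []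

-- ===== PORT B =====
def arrangeTheQuantity_alt (itemToArrange : List String) : List String :=
  -- items = sorted(itemToArrange, key=len)
  let items := PySem.List.sorted itemToArrange (fun s => PySem.Str.len s)
  -- for s in reversed(items): if not result or len(result[0]) != len(s): result.insert(0, s)
  items.reverse.foldl (fun result s =>
    match result with
    | [] => [s]
    | t :: _ => if PySem.Str.len t ≠ PySem.Str.len s then s :: result else result) []

-- ===== PRECONDITION & SPEC =====
def Spec_arrangeTheQuantity (itemToArrange : List String) (out : List String) : Prop := out = arrangeTheQuantity_alt itemToArrange
instance (itemToArrange : List String) (out : List String) : Decidable (Spec_arrangeTheQuantity itemToArrange out) := by unfold Spec_arrangeTheQuantity; infer_instance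

-- ===== CLAIM (what is proved, stated in full; the proofs are below) =====
def Claim_equal_arrangeTheQuantity : Prop := ∀ (itemToArrange : List String), Dom_arrangeTheQuantity itemToArrange → Spec_arrangeTheQuantity itemToArrange (arrangeTheQuantity itemToArrange)

-- ===== LEMMAS AND PROOFS =====

-- insertBy keeps a list sorted by an Int measure
theorem pv_insertBy_pairwise {α : Type} (k : α → Int) (before : α → α → Bool)
    (hT : ∀ a b, before a b = true → k a ≤ k b)
    (hF : ∀ a b, before a b = false → k b ≤ k a)
    (x : α) (l : List α) (hl : l.Pairwise (fun a b => k a ≤ k b)) :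
    (PySem.List.insertBy before x l).Pairwise (fun a b => k a ≤ k b) := by
  induction l with
  | nil => simp [PySem.List.insertBy]
  | cons y ys ih =>
    rw [List.pairwise_cons] at hl
    obtain ⟨hy, hys⟩ := hl
    by_cases hb : before x y = true
    · rw [show PySem.List.insertBy before x (y :: ys) =
        if before x y then x :: y :: ys else y :: PySem.List.insertBy before x ys by
          simp [PySem.List.insertBy], if_pos hb]
      refine List.pairwise_cons.2 ⟨?_, List.pairwise_cons.2 ⟨hy, hys⟩⟩
      intro z hz
      rcases List.mem_cons.1 hz with rfl | hz
      · exact hT _ _ hb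
      · exact le_trans (hT _ _ hb) (hy z hz)
    · rw [show PySem.List.insertBy before x (y :: ys) =
        if before x y then x :: y :: ys else y :: PySem.List.insertBy before x ys by
          simp [PySem.List.insertBy], if_neg hb]
      refine List.pairwise_cons.2 ⟨?_, ih hys⟩
      intro z hz
      rcases (PySem.List.mem_insertBy before x z ys).1 hz with rfl | hz
      · exact hF _ _ (by simpa using hb)
      · exact hy z hz

theorem pv_foldl_insertBy_pairwise {α : Type} (k : α → Int) (before : α → α → Bool)
    (hT : ∀ a b, before a b = true → k a ≤ k b)
    (hF : ∀ a b, before a b = false → k b ≤ k a)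
    (xs : List α) (acc : List α) (hacc : acc.Pairwise (fun a b => k a ≤ k b)) :
    (xs.foldl (fun acc x => PySem.List.insertBy before x acc) acc).Pairwise
      (fun a b => k a ≤ k b) := by
  induction xs generalizing acc with
  | nil => exact hacc
  | cons x xs ih =>
    exact ih _ (pv_insertBy_pairwise k before hT hF x acc hacc)

-- any strictly key-increasing rearrangement of xs IS sorted(xs) under a lexicographic tuple key
theorem pv_sorted2_eq (xs ys : List (Int × String))
    (hperm : ys.Perm xs) (hp : ys.Pairwise (fun a b => a.1 < b.1)) :
    PySem.List.sorted2 xs (fun p => p.1) (fun p => p.2) = ys := by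
  have hbody : PySem.List.sorted2 xs (fun p => p.1) (fun p => p.2) =
      List.foldl (fun acc x => PySem.List.insertBy
        (fun a b => decide (a.1 < b.1) || (!decide (b.1 < a.1) && decide (a.2 < b.2))) x acc)
        [] xs := rfl
  set bef : Int × String → Int × String → Bool :=
    fun a b => decide (a.1 < b.1) || (!decide (b.1 < a.1) && decide (a.2 < b.2)) with hbef
  have hzle : (PySem.List.sorted2 xs (fun p => p.1) (fun p => p.2)).Pairwise
      (fun a b => a.1 ≤ b.1) := by
    rw [hbody]
    refine pv_foldl_insertBy_pairwise (fun p => p.1) bef ?_ ?_ xs [] (by simp)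
    · intro a b h
      rw [hbef] at h
      simp only [Bool.or_eq_true, Bool.and_eq_true, Bool.not_eq_true', decide_eq_true_eq,
        decide_eq_false_iff_not] at h
      rcases h with h | ⟨h, _⟩
      · exact le_of_lt h
      · exact le_of_not_gt h
    · intro a b h
      rw [hbef] at h
      simp only [Bool.or_eq_false_iff, decide_eq_false_iff_not] at h
      exact le_of_not_gt h.1
  have hzperm : (PySem.List.sorted2 xs (fun p => p.1) (fun p => p.2)).Perm ys :=
    (PySem.List.sorted2_perm xs (fun p => p.1) (fun p => p.2) false).trans hperm.symm
  have hysnd : (ys.map Prod.fst).Nodup :=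
    (List.pairwise_map.2 hp).imp ne_of_lt
  have hznd : ((PySem.List.sorted2 xs (fun p => p.1) (fun p => p.2)).map Prod.fst).Nodup :=
    ((hzperm.map Prod.fst).nodup_iff).2 hysnd
  have hzlt : (PySem.List.sorted2 xs (fun p => p.1) (fun p => p.2)).Pairwise
      (fun a b => a.1 < b.1) := by
    have hne := List.pairwise_map.1 hznd
    exact (hzle.and hne).imp (fun h => lt_of_le_of_ne h.1 h.2)
  exact hzperm.eq_of_pairwise (fun a b _ _ h1 h2 => absurd h2 (not_lt.2 (le_of_lt h1)))
    hzlt hp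

-- stability of Python's sort: filtering one length class commutes with sorting by length
theorem pv_fs_pos (x : String) (k : Int) (hx : PySem.Str.len x = k) :
    [x].filter (fun s => decide (PySem.Str.len s = k)) = [x] := by
  rw [List.filter_cons_of_pos (p := fun s => decide (PySem.Str.len s = k)) (decide_eq_true hx),
    List.filter_nil]

theorem pv_fs_neg (x : String) (k : Int) (hx : ¬ PySem.Str.len x = k) :
    [x].filter (fun s => decide (PySem.Str.len s = k)) = [] := by
  rw [List.filter_cons_of_neg (p := fun s => decide (PySem.Str.len s = k)) (by simpa using hx),
    List.filter_nil]

theorem pv_filter_insertBy (x : String) (l : List String) (k : Int)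
    (hl : l.Pairwise (fun a b => PySem.Str.len a ≤ PySem.Str.len b)) :
    (PySem.List.insertBy (fun a b => decide (PySem.Str.len a < PySem.Str.len b)) x l).filter
        (fun s => decide (PySem.Str.len s = k)) =
      l.filter (fun s => decide (PySem.Str.len s = k)) ++
        [x].filter (fun s => decide (PySem.Str.len s = k)) := by
  induction l with
  | nil => simp [PySem.List.insertBy]
  | cons y ys ih =>
    rw [List.pairwise_cons] at hl
    obtain ⟨hy, hys⟩ := hl
    rw [show PySem.List.insertBy (fun a b => decide (PySem.Str.len a < PySem.Str.len b)) x (y :: ys) =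
      if decide (PySem.Str.len x < PySem.Str.len y) then x :: y :: ys
      else y :: PySem.List.insertBy (fun a b => decide (PySem.Str.len a < PySem.Str.len b)) x ys by
        simp [PySem.List.insertBy]]
    by_cases hb : PySem.Str.len x < PySem.Str.len y
    · rw [if_pos (decide_eq_true hb)]
      by_cases hx : PySem.Str.len x = k
      · have hnil : (y :: ys).filter (fun s => decide (PySem.Str.len s = k)) = [] := by
          rw [List.filter_eq_nil_iff]
          intro a ha
          rcases List.mem_cons.1 ha with rfl | ha
          · simp only [decide_eq_true_eq]; omega
          · have := hy a ha
            simp only [decide_eq_true_eq]; omega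
        rw [List.filter_cons_of_pos (p := fun s => decide (PySem.Str.len s = k)) (decide_eq_true hx), hnil,
          pv_fs_pos x k hx, List.nil_append]
      · rw [List.filter_cons_of_neg (p := fun s => decide (PySem.Str.len s = k)) (a := x) (by simpa using hx),
          pv_fs_neg x k hx, List.append_nil]
    · rw [if_neg (by simpa using hb)]
      by_cases hyk : PySem.Str.len y = k
      · rw [List.filter_cons_of_pos (p := fun s => decide (PySem.Str.len s = k)) (a := y) (decide_eq_true hyk), ih hys,
          List.filter_cons_of_pos (p := fun s => decide (PySem.Str.len s = k)) (a := y) (l := ys) (decide_eq_true hyk), List.cons_append]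
      · rw [List.filter_cons_of_neg (p := fun s => decide (PySem.Str.len s = k)) (a := y) (by simpa using hyk), ih hys,
          List.filter_cons_of_neg (p := fun s => decide (PySem.Str.len s = k)) (a := y) (l := ys) (by simpa using hyk)]

theorem pv_filter_foldl_insertBy (xs acc : List String) (k : Int)
    (hacc : acc.Pairwise (fun a b => PySem.Str.len a ≤ PySem.Str.len b)) :
    (xs.foldl (fun acc x =>
        PySem.List.insertBy (fun a b => decide (PySem.Str.len a < PySem.Str.len b)) x acc)
      acc).filter (fun s => decide (PySem.Str.len s = k)) =
    acc.filter (fun s => decide (PySem.Str.len s = k)) ++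
      xs.filter (fun s => decide (PySem.Str.len s = k)) := by
  induction xs generalizing acc with
  | nil => simp
  | cons x xs ih =>
    have hins := pv_insertBy_pairwise PySem.Str.len
      (fun a b => decide (PySem.Str.len a < PySem.Str.len b))
      (fun a b h => le_of_lt (by simpa using h)) (fun a b h => le_of_not_gt (by simpa using h))
      x acc hacc
    rw [List.foldl_cons, ih _ hins, pv_filter_insertBy x acc k hacc]
    by_cases hx : PySem.Str.len x = k
    · rw [pv_fs_pos x k hx,
        List.filter_cons_of_pos (p := fun s => decide (PySem.Str.len s = k)) (a := x) (decide_eq_true hx),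
        List.append_assoc, List.singleton_append]
    · rw [pv_fs_neg x k hx,
        List.filter_cons_of_neg (p := fun s => decide (PySem.Str.len s = k)) (a := x) (by simpa using hx),
        List.append_nil]

theorem pv_filter_sorted (xs : List String) (k : Int) :
    (PySem.List.sorted xs (fun s => PySem.Str.len s)).filter
        (fun s => decide (PySem.Str.len s = k)) =
      xs.filter (fun s => decide (PySem.Str.len s = k)) := by
  rw [PySem.List.sorted_eq_foldl_insertBy]
  simpa using pv_filter_foldl_insertBy xs [] k (by simp)

def pvLastLen (xs : List String) (l : Int) : String :=
  ((xs.filter (fun s => decide (PySem.Str.len s = l))).getLast?).getD ""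

def pvKeys (xs : List String) : List Int :=
  PySem.List.sorted (PySem.Set.ofList (xs.map PySem.Str.len)) (fun k => k)

def pvCanon (xs : List String) : List String := (pvKeys xs).map (pvLastLen xs)

def pvDict (xs : List String) : PySem.Dict Int String :=
  xs.foldl (fun d s => d.insert (PySem.Str.len s) s) PySem.Dict.empty

theorem pvDict_append (xs : List String) (s : String) :
    pvDict (xs ++ [s]) = (pvDict xs).insert (PySem.Str.len s) s := by
  simp [pvDict, List.foldl_append]

theorem pvDict_get? (xs : List String) (l : Int) :
    (pvDict xs).get? l = (xs.filter (fun s => decide (PySem.Str.len s = l))).getLast? := by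
  induction xs using List.reverseRecOn with
  | nil => simp [pvDict, PySem.Dict.get?_empty]
  | append_singleton xs s ih =>
    rw [pvDict_append, PySem.Dict.get?_insert, List.filter_append]
    by_cases h : PySem.Str.len s = l
    · rw [if_pos h.symm, pv_fs_pos s l h, List.getLast?_concat]
    · rw [if_neg (fun hh => h hh.symm), pv_fs_neg s l h, List.append_nil, ih]

theorem pvDict_nodup_keys (xs : List String) : (pvDict xs).keys.Nodup := by
  induction xs using List.reverseRecOn with
  | nil => exact PySem.Dict.nodup_keys_empty
  | append_singleton xs s ih =>
    rw [pvDict_append]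
    exact PySem.Dict.nodup_keys_insert _ _ _ ih

theorem pvKeys_pairwise (xs : List String) : (pvKeys xs).Pairwise (· < ·) :=
  PySem.List.sorted_ofList_pairwise_lt _

theorem pvKeys_nodup (xs : List String) : (pvKeys xs).Nodup :=
  (pvKeys_pairwise xs).imp ne_of_lt

theorem pvKeys_mem (xs : List String) (l : Int) :
    l ∈ pvKeys xs ↔ l ∈ xs.map PySem.Str.len := by
  rw [pvKeys, PySem.List.mem_sorted, PySem.Set.mem_ofList]

-- the last element of a nonempty length class
theorem pvLastLen_spec (xs : List String) (l : Int) (h : l ∈ xs.map PySem.Str.len) :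
    (xs.filter (fun s => decide (PySem.Str.len s = l))).getLast? = some (pvLastLen xs l) ∧
      PySem.Str.len (pvLastLen xs l) = l := by
  have hne : xs.filter (fun s => decide (PySem.Str.len s = l)) ≠ [] := by
    rw [Ne, List.filter_eq_nil_iff]
    push Not
    obtain ⟨s, hs, hsl⟩ := List.mem_map.1 h
    exact ⟨s, hs, by simpa using hsl⟩
  obtain ⟨a, ha⟩ := Option.ne_none_iff_exists'.1 (mt List.getLast?_eq_none_iff.1 hne)
  have hmem : a ∈ xs.filter (fun s => decide (PySem.Str.len s = l)) :=
    List.mem_of_getLast? ha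
  have hal : PySem.Str.len a = l := by simpa using (List.mem_filter.1 hmem).2
  rw [pvLastLen, ha]
  exact ⟨rfl, hal⟩

theorem pv_ofList_append (ps : List (Int × String)) (p : Int × String) :
    PySem.Dict.ofList (ps ++ [p]) = (PySem.Dict.ofList ps).insert p.1 p.2 := by
  simp [PySem.Dict.ofList, PySem.Dict.update, List.foldl_append]

theorem pv_ofList_mem_keys (ps : List (Int × String)) (k : Int) :
    k ∈ (PySem.Dict.ofList ps).keys ↔ k ∈ ps.map Prod.fst := by
  induction ps using List.reverseRecOn with
  | nil =>
    rw [show PySem.Dict.ofList ([] : List (Int × String)) = PySem.Dict.empty from rfl,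
      PySem.Dict.keys_empty, List.map_nil]
  | append_singleton ps p ih =>
    rw [pv_ofList_append, PySem.Dict.mem_keys_insert, List.map_append, ih]
    simp [or_comm]

theorem pv_items_ofList (ps : List (Int × String)) (h : (ps.map Prod.fst).Nodup) :
    (PySem.Dict.ofList ps).items = ps := by
  induction ps using List.reverseRecOn with
  | nil => rfl
  | append_singleton ps p ih =>
    rw [List.map_append] at h
    have h1 : (ps.map Prod.fst).Nodup := (List.nodup_append.1 h).1
    have h2 : p.1 ∉ ps.map Prod.fst := by
      have hd := (List.nodup_append.1 h).2.2
      intro hc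
      exact hd p.1 hc p.1 (by simp) rfl
    rw [pv_ofList_append,
      PySem.Dict.items_insert_of_not_contains _ _ (by
        rw [PySem.Dict.contains_eq_decide_mem_keys, decide_eq_false_iff_not, pv_ofList_mem_keys]
        exact h2),
      ih h1]

theorem pvItems_perm (xs : List String) :
    (pvDict xs).items.Perm ((pvKeys xs).map (fun l => (l, pvLastLen xs l))) := by
  have hnd1 : (pvDict xs).items.Nodup := by
    have h := pvDict_nodup_keys xs
    simp only [PySem.Dict.keys] at h
    exact h.of_map _
  have hnd2 : ((pvKeys xs).map (fun l => (l, pvLastLen xs l))).Nodup :=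
    (pvKeys_nodup xs).map (fun a b hab => congrArg Prod.fst hab)
  rw [List.perm_ext_iff_of_nodup hnd1 hnd2]
  intro p
  have hget := PySem.Dict.get?_eq_some_iff_mem_items (pvDict xs) p.1 p.2 (pvDict_nodup_keys xs)
  constructor
  · intro hp
    have hsome : (pvDict xs).get? p.1 = some p.2 := hget.2 (by simpa using hp)
    rw [pvDict_get? xs p.1] at hsome
    have hmem : p.2 ∈ xs.filter (fun s => decide (PySem.Str.len s = p.1)) :=
      List.mem_of_getLast? hsome
    have hlen : p.1 ∈ xs.map PySem.Str.len := by
      obtain ⟨h2, hl⟩ := List.mem_filter.1 hmem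
      exact List.mem_map.2 ⟨p.2, h2, by simpa using hl⟩
    refine List.mem_map.2 ⟨p.1, (pvKeys_mem xs p.1).2 hlen, ?_⟩
    have hlast := (pvLastLen_spec xs p.1 hlen).1
    rw [hlast] at hsome
    rw [Option.some.inj hsome]
  · intro hp
    obtain ⟨l, hl, hlp⟩ := List.mem_map.1 hp
    have hlen : l ∈ xs.map PySem.Str.len := (pvKeys_mem xs l).1 hl
    have hsome : (pvDict xs).get? l = some (pvLastLen xs l) := by
      rw [pvDict_get? xs l]
      exact (pvLastLen_spec xs l hlen).1
    have := (PySem.Dict.get?_eq_some_iff_mem_items (pvDict xs) l (pvLastLen xs l)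
      (pvDict_nodup_keys xs)).1 hsome
    rwa [hlp] at this

theorem pv_A_eq_canon (xs : List String) : arrangeTheQuantity xs = pvCanon xs := by
  have hperm : ((pvKeys xs).map (fun l => (l, pvLastLen xs l))).Perm (pvDict xs).items :=
    (pvItems_perm xs).symm
  have hpw : ((pvKeys xs).map (fun l => (l, pvLastLen xs l))).Pairwise (fun a b => a.1 < b.1) :=
    List.pairwise_map.2 (by simpa using pvKeys_pairwise xs)
  have hs2 := pv_sorted2_eq (pvDict xs).items _ hperm hpw
  have hfst : ((pvKeys xs).map (fun l => (l, pvLastLen xs l))).map Prod.fst = pvKeys xs := by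
    rw [List.map_map]
    exact List.map_id _
  have hA : arrangeTheQuantity xs =
      ((PySem.Dict.ofList (PySem.List.sorted2 (pvDict xs).items
        (fun p => p.1) (fun p => p.2))).items).foldl (fun acc p => acc ++ [p.2]) [] := rfl
  rw [hA, hs2, pv_items_ofList _ (by rw [hfst]; exact pvKeys_nodup xs),
    PySem.List.foldl_append_singleton_eq_map (f := fun p : Int × String => p.2), List.nil_append, List.map_map]
  rfl

-- ===== B-side: a length-sorted list scanned right-to-left equals the canonical value =====

theorem pv_getLast?_cons_of_ne_nil {α : Type} (a : α) (l : List α) (h : l ≠ []) :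
    (a :: l).getLast? = l.getLast? := by
  cases l with
  | nil => exact absurd rfl h
  | cons b m => exact List.getLast?_cons_cons ..

theorem pvKeys_cons_of_not_mem (x : String) (rest : List String)
    (hx : ∀ y ∈ rest, PySem.Str.len x ≤ PySem.Str.len y)
    (hmem : PySem.Str.len x ∉ rest.map PySem.Str.len) :
    pvKeys (x :: rest) = PySem.Str.len x :: pvKeys rest := by
  apply PySem.List.sorted_eq_of_perm_of_pairwise_lt
  · rw [List.perm_ext_iff_of_nodup
      (List.nodup_cons.2 ⟨fun hc => hmem ((pvKeys_mem rest _).1 hc), pvKeys_nodup rest⟩)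
      (PySem.Set.nodup_ofList _)]
    intro a
    rw [PySem.Set.mem_ofList, List.map_cons, List.mem_cons, List.mem_cons, pvKeys_mem]
  · refine List.pairwise_cons.2 ⟨?_, pvKeys_pairwise rest⟩
    intro k hk
    have hk' : k ∈ rest.map PySem.Str.len := (pvKeys_mem rest k).1 hk
    obtain ⟨y, hy, hyl⟩ := List.mem_map.1 hk'
    have hle : PySem.Str.len x ≤ k := hyl ▸ hx y hy
    exact lt_of_le_of_ne hle (fun hh => hmem (hh ▸ hk'))

theorem pvCanon_cons_of_not_mem (x : String) (rest : List String)
    (hx : ∀ y ∈ rest, PySem.Str.len x ≤ PySem.Str.len y)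
    (hmem : PySem.Str.len x ∉ rest.map PySem.Str.len) :
    pvCanon (x :: rest) = x :: pvCanon rest := by
  rw [pvCanon, pvKeys_cons_of_not_mem x rest hx hmem, List.map_cons]
  congr 1
  · have hnil : rest.filter (fun s => decide (PySem.Str.len s = PySem.Str.len x)) = [] := by
      rw [List.filter_eq_nil_iff]
      intro a ha hc
      exact hmem (List.mem_map.2 ⟨a, ha, by simpa using hc⟩)
    rw [pvLastLen, List.filter_cons_of_pos
      (p := fun s => decide (PySem.Str.len s = PySem.Str.len x)) (decide_eq_true rfl), hnil]
    rfl
  · apply List.map_congr_left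
    intro k hk
    have hk' : k ∈ rest.map PySem.Str.len := (pvKeys_mem rest k).1 hk
    have hkx : ¬ PySem.Str.len x = k := fun hh => hmem (hh ▸ hk')
    rw [pvLastLen, pvLastLen, List.filter_cons_of_neg
      (p := fun s => decide (PySem.Str.len s = k)) (by simpa using hkx)]

theorem pvCanon_cons_of_mem (x : String) (rest : List String)
    (hmem : PySem.Str.len x ∈ rest.map PySem.Str.len) :
    pvCanon (x :: rest) = pvCanon rest := by
  have hkeys : pvKeys (x :: rest) = pvKeys rest := by
    apply PySem.List.sorted_eq_sorted_of_perm _ _ _ (fun a b h => h)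
    rw [List.perm_ext_iff_of_nodup (PySem.Set.nodup_ofList _) (PySem.Set.nodup_ofList _)]
    intro a
    rw [PySem.Set.mem_ofList, PySem.Set.mem_ofList, List.map_cons, List.mem_cons]
    constructor
    · rintro (rfl | h)
      · exact hmem
      · exact h
    · exact Or.inr
  rw [pvCanon, pvCanon, hkeys]
  apply List.map_congr_left
  intro k hk
  by_cases hkx : PySem.Str.len x = k
  · have hne : rest.filter (fun s => decide (PySem.Str.len s = k)) ≠ [] := by
      rw [Ne, List.filter_eq_nil_iff]
      intro hc
      obtain ⟨y, hy, hyl⟩ := List.mem_map.1 hmem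
      exact hc y hy (decide_eq_true (hyl.trans hkx))
    rw [pvLastLen, pvLastLen, List.filter_cons_of_pos
      (p := fun s => decide (PySem.Str.len s = k)) (decide_eq_true hkx),
      pv_getLast?_cons_of_ne_nil _ _ hne]
  · rw [pvLastLen, pvLastLen, List.filter_cons_of_neg
      (p := fun s => decide (PySem.Str.len s = k)) (by simpa using hkx)]

theorem pvCanon_head_of_mem (x : String) (rest : List String)
    (hx : ∀ y ∈ rest, PySem.Str.len x ≤ PySem.Str.len y)
    (hmem : PySem.Str.len x ∈ rest.map PySem.Str.len) :
    ∃ t, pvCanon rest = pvLastLen rest (PySem.Str.len x) :: t ∧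
      PySem.Str.len (pvLastLen rest (PySem.Str.len x)) = PySem.Str.len x := by
  have hxk : PySem.Str.len x ∈ pvKeys rest := (pvKeys_mem rest _).2 hmem
  cases h : pvKeys rest with
  | nil => rw [h] at hxk; exact absurd hxk (List.not_mem_nil)
  | cons k0 t' =>
    have hk0 : k0 = PySem.Str.len x := by
      rw [h] at hxk
      rcases List.mem_cons.1 hxk with hh | hh
      · exact hh.symm
      · have hpw := pvKeys_pairwise rest
        rw [h, List.pairwise_cons] at hpw
        have hlt : k0 < PySem.Str.len x := hpw.1 _ hh
        have hk0m : k0 ∈ rest.map PySem.Str.len := (pvKeys_mem rest k0).1 (h ▸ List.mem_cons_self)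
        obtain ⟨y, hy, hyl⟩ := List.mem_map.1 hk0m
        have : PySem.Str.len x ≤ k0 := hyl ▸ hx y hy
        omega
    refine ⟨t'.map (pvLastLen rest), ?_, (pvLastLen_spec rest _ hmem).2⟩
    rw [pvCanon, h, hk0, List.map_cons]

-- the right-to-left dedup scan of a length-sorted list computes the canonical value
theorem pv_foldr_sorted (items : List String)
    (h : items.Pairwise (fun a b => PySem.Str.len a ≤ PySem.Str.len b)) :
    items.foldr (fun s result =>
      match result with
      | [] => [s]
      | t :: _ => if PySem.Str.len t ≠ PySem.Str.len s then s :: result else result) [] =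
    pvCanon items := by
  induction items with
  | nil => rfl
  | cons x rest ih =>
    rw [List.pairwise_cons] at h
    obtain ⟨hx, hrest⟩ := h
    rw [List.foldr_cons, ih hrest]
    by_cases hmem : PySem.Str.len x ∈ rest.map PySem.Str.len
    · obtain ⟨t, hc, hlen⟩ := pvCanon_head_of_mem x rest hx hmem
      rw [pvCanon_cons_of_mem x rest hmem, hc]
      have hlen2 : ((pvLastLen rest (PySem.Str.len x)).length : Int) = (x.length : Int) := by
        simpa [PySem.Str.len_eq] using hlen
      have hlen' : (pvLastLen rest (PySem.Str.len x)).length = x.length := by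
        exact_mod_cast hlen2
      have hsx : PySem.Str.len x = (x.length : Int) := by simp [PySem.Str.len_eq]
      rw [hsx] at hlen'
      simp [hlen']
    · rw [pvCanon_cons_of_not_mem x rest hx hmem]
      cases hc : pvCanon rest with
      | nil => rfl
      | cons r t =>
        have hr : r ∈ pvCanon rest := hc ▸ List.mem_cons_self
        obtain ⟨k, hk, hkr⟩ := List.mem_map.1 hr
        have hlenr : PySem.Str.len r = k :=
          hkr ▸ (pvLastLen_spec rest k ((pvKeys_mem rest k).1 hk)).2
        have hne : PySem.Str.len r ≠ PySem.Str.len x := by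
          intro hh
          exact hmem (hh ▸ hlenr ▸ (pvKeys_mem rest k).1 hk)
        have hne' : ¬ r.length = x.length := by
          intro hh
          exact hne (by simp [PySem.Str.len_eq, hh])
        simp [hne']

theorem pv_B_eq_canon (xs : List String) : arrangeTheQuantity_alt xs = pvCanon xs := by
  have hB : arrangeTheQuantity_alt xs =
      (PySem.List.sorted xs (fun s => PySem.Str.len s)).reverse.foldl (fun result s =>
        match result with
        | [] => [s]
        | t :: _ => if PySem.Str.len t ≠ PySem.Str.len s then s :: result else result) [] := rfl
  rw [hB, List.foldl_reverse,
    pv_foldr_sorted _ (PySem.List.sorted_pairwise xs (fun s => PySem.Str.len s))]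
  -- pvCanon (sorted xs len) = pvCanon xs
  have hkeys : pvKeys (PySem.List.sorted xs (fun s => PySem.Str.len s)) = pvKeys xs := by
    apply PySem.List.sorted_eq_sorted_of_perm _ _ _ (fun a b h => h)
    rw [List.perm_ext_iff_of_nodup (PySem.Set.nodup_ofList _) (PySem.Set.nodup_ofList _)]
    intro a
    rw [PySem.Set.mem_ofList, PySem.Set.mem_ofList]
    exact ((PySem.List.sorted_perm xs (fun s => PySem.Str.len s) false).map _).mem_iff
  rw [pvCanon, pvCanon, hkeys]
  apply List.map_congr_left
  intro k _
  rw [pvLastLen, pvLastLen, pv_filter_sorted]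

-- ===== VERDICT (by name: the statement is the Claim_ definition above) =====
theorem arrangeTheQuantity_spec : Claim_equal_arrangeTheQuantity := by
  intro xs _
  unfold Spec_arrangeTheQuantity
  rw [pv_A_eq_canon, pv_B_eq_canon]
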